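-- pv_equiv track=rewrite | github.com/zhangrui184/re_json_git | caculate9.py | new_content
-- ===== SOURCE A (Python) =====
-- def new_content(all_content):
--     doi='doi'
--     index =0
--     doi_content=[]
--     au_content=[]
--     for con in all_content:
--         ans =False
--         try:
--            ans=doi in con
--         except Exception:
--             ans =False
--         if ans is True:
--             index+=1
--             doi_content.append(con)
--     Corresponding_author_str='Corresponding author'
--     au_index=0
--     for con in all_content:
--         ans =False
--         try:
--            ans=Corresponding_author_str in con
--         except Exception:
--             ans =False
--         if ans is True:
--             au_index+=1
--             au_content.append(con)
--     return index,au_index,doi_content,au_content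
-- ===== SOURCE B (Python) =====
-- def new_content(all_content):
--     # Single fused pass: both membership checks per element, each in its own
--     # try/except as in the original.
--     index = 0
--     au_index = 0
--     doi_content = []
--     au_content = []
--     for con in all_content:
--         try:
--             ans1 = 'doi' in con
--         except Exception:
--             ans1 = False
--         try:
--             ans2 = 'Corresponding author' in con
--         except Exception:
--             ans2 = False
--         if ans1 is True:
--             index += 1
--             doi_content.append(con)
--         if ans2 is True:
--             au_index += 1
--             au_content.append(con)
--     return index, au_index, doi_content, au_content
-- ===== Notes on version B (the rewrite author's own statement) =====
-- stated objective: simpler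
-- what changed: Replaces A's two separate passes over all_content with one fused loop that performs both substring checks and updates all four accumulators per element.
import Mathlib
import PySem

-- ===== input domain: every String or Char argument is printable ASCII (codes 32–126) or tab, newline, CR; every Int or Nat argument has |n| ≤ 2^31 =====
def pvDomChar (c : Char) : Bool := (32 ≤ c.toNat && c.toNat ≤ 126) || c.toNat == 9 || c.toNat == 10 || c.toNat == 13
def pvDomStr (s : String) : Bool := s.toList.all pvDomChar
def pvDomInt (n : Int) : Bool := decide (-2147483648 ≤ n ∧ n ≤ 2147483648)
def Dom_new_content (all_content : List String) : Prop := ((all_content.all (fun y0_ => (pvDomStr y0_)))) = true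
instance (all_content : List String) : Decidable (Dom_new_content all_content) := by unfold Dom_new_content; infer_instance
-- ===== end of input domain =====

-- B fuses A's two passes into one loop; return value is unchanged ('simpler').

-- ===== PORT A =====
-- A: first pass counts/collects elements containing "doi", second pass those
-- containing "Corresponding author" (on strings the try/except never fires).
def new_content (all_content : List String) : Int × Int × List String × List String :=
  let p1 := all_content.foldl
    (fun (st : Int × List String) con =>
      let ans := PySem.Str.isIn "doi" con
      if ans then (st.1 + 1, st.2 ++ [con]) else st) (0, [])
  let p2 := all_content.foldl
    (fun (st : Int × List String) con =>
      let ans := PySem.Str.isIn "Corresponding author" con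
      if ans then (st.1 + 1, st.2 ++ [con]) else st) (0, [])
  (p1.1, p2.1, p1.2, p2.2)

-- ===== PORT B =====
-- B: one fused pass maintaining all four accumulators.
def new_content_alt (all_content : List String) : Int × Int × List String × List String :=
  all_content.foldl
    (fun (st : Int × Int × List String × List String) con =>
      let ans1 := PySem.Str.isIn "doi" con
      let ans2 := PySem.Str.isIn "Corresponding author" con
      let st := if ans1 then (st.1 + 1, st.2.1, st.2.2.1 ++ [con], st.2.2.2) else st
      if ans2 then (st.1, st.2.1 + 1, st.2.2.1, st.2.2.2 ++ [con]) else st)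
    (0, 0, [], [])

-- ===== PRECONDITION & SPEC =====
def Spec_new_content (all_content : List String) (out : Int × Int × List String × List String) : Prop := out = new_content_alt all_content
instance (all_content : List String) (out : Int × Int × List String × List String) : Decidable (Spec_new_content all_content out) := by unfold Spec_new_content; infer_instance

-- ===== CLAIM (what is proved, stated in full; the proofs are below) =====
def Claim_equal_new_content : Prop := ∀ (all_content : List String), Dom_new_content all_content → Spec_new_content all_content (new_content all_content)

-- ===== LEMMAS AND PROOFS =====

-- The fused fold equals the pair of separate folds, for any starting accumulators.
theorem new_content_fuse (xs : List String) (i j : Int) (d a : List String) :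
    xs.foldl
      (fun (st : Int × Int × List String × List String) con =>
        let ans1 := PySem.Str.isIn "doi" con
        let ans2 := PySem.Str.isIn "Corresponding author" con
        let st := if ans1 then (st.1 + 1, st.2.1, st.2.2.1 ++ [con], st.2.2.2) else st
        if ans2 then (st.1, st.2.1 + 1, st.2.2.1, st.2.2.2 ++ [con]) else st)
      (i, j, d, a)
    =
    ((xs.foldl (fun (st : Int × List String) con =>
        let ans := PySem.Str.isIn "doi" con
        if ans then (st.1 + 1, st.2 ++ [con]) else st) (i, d)).1,
     (xs.foldl (fun (st : Int × List String) con =>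
        let ans := PySem.Str.isIn "Corresponding author" con
        if ans then (st.1 + 1, st.2 ++ [con]) else st) (j, a)).1,
     (xs.foldl (fun (st : Int × List String) con =>
        let ans := PySem.Str.isIn "doi" con
        if ans then (st.1 + 1, st.2 ++ [con]) else st) (i, d)).2,
     (xs.foldl (fun (st : Int × List String) con =>
        let ans := PySem.Str.isIn "Corresponding author" con
        if ans then (st.1 + 1, st.2 ++ [con]) else st) (j, a)).2) := by
  induction xs generalizing i j d a with
  | nil => rfl
  | cons x xs ih =>
    simp only [List.foldl_cons]
    cases h1 : PySem.Str.isIn "doi" x <;> cases h2 : PySem.Str.isIn "Corresponding author" x <;>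
      simp only [h1, h2, if_true, if_false, Bool.false_eq_true] <;>
      exact ih ..

-- ===== VERDICT (by name: the statement is the Claim_ definition above) =====
theorem new_content_spec : Claim_equal_new_content := by
  intro all_content _
  unfold Spec_new_content new_content new_content_alt
  rw [new_content_fuse]
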